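-- pv_equiv track=rewrite | github.com/ariffadhillah/propertix | scraper/sites/propertia/detail_page.py | choose_primary_price
-- ===== SOURCE A (Python) =====
-- def choose_primary_price(prices: list[dict], source_url: str) -> dict | None:
--     if not prices:
--         return None
--
--     url = (source_url or "").lower()
--
--     def find_cat(cat: str):
--         for p in prices:
--             if p.get("category") == cat:
--                 return p
--         return None
--
--     if "/for-sale/" in url or "/sale/" in url:
--         return find_cat("freehold") or find_cat("leasehold") or prices[0]
--
--     if "/for-rent/" in url or "/rent/" in url:
--         return find_cat("yearly") or find_cat("monthly") or prices[0]
--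
--     return (
--         find_cat("freehold")
--         or find_cat("leasehold")
--         or find_cat("yearly")
--         or find_cat("monthly")
--         or prices[0]
--     )
-- ===== SOURCE B (Python) =====
-- def choose_primary_price(prices: list[dict], source_url: str) -> dict | None:
--     if not prices:
--         return None
--
--     url = (source_url or "").lower()
--
--     if "/for-sale/" in url or "/sale/" in url:
--         cats = ["freehold", "leasehold"]
--     elif "/for-rent/" in url or "/rent/" in url:
--         cats = ["yearly", "monthly"]
--     else:
--         cats = ["freehold", "leasehold", "yearly", "monthly"]
--
--     best = None
--     best_rank = len(cats)
--     for p in prices: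
--         c = p.get("category")
--         if c in cats:
--             r = cats.index(c)
--             if r < best_rank:
--                 best, best_rank = p, r
--     return best if best is not None else prices[0]
-- ===== Notes on version B (the rewrite author's own statement) =====
-- stated objective: alternative
-- what changed: Replace the per-category or-chain of repeated full scans (find_cat per category) with one priority list chosen from the URL and a single pass over prices keeping the price of strictly-smallest category rank, falling back to prices[0]; same cost in practice since A short-circuits.
import Mathlib
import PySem

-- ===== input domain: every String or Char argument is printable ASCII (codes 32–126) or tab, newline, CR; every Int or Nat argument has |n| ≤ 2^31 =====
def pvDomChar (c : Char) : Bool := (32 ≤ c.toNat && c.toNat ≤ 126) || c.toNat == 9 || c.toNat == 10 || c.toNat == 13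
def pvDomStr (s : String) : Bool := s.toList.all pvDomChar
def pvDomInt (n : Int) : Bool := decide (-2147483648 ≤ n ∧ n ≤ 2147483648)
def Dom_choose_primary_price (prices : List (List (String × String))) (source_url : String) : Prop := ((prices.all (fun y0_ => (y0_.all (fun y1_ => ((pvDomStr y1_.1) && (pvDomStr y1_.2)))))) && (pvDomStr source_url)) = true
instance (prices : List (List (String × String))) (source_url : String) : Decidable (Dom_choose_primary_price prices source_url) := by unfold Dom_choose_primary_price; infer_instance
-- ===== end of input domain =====

-- B replaces A's or-chain of per-category scans with one single-pass loop keeping the price of smallest category rank (objective: alternative single-traversal algorithm).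

-- ===== PORT A =====
-- p.get("category") on a dict (assoc list, first match)
def pvGet (p : List (String × String)) (k : String) : Option String :=
  match p.find? (fun kv => kv.1 == k) with
  | some kv => some kv.2
  | none => none

-- the inner 'find_cat' loop of A
def find_cat (prices : List (List (String × String))) (cat : String) : Option (List (String × String)) :=
  match prices with
  | [] => none
  | p :: rest => if pvGet p "category" == some cat then some p else find_cat rest cat

-- Python 'x or y' on dict-or-None values: a dict is falsy iff empty
def pyOr (a b : Option (List (String × String))) : Option (List (String × String)) :=
  match a with
  | some p => if p.isEmpty then b else some p
  | none => b

def choose_primary_price (prices : List (List (String × String))) (source_url : String) : Option (List (String × String)) :=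
  match prices with
  | [] => none
  | p0 :: _ =>
    let url := PySem.Str.lower source_url
    if PySem.Str.isIn "/for-sale/" url || PySem.Str.isIn "/sale/" url then
      pyOr (find_cat prices "freehold") (pyOr (find_cat prices "leasehold") (some p0))
    else if PySem.Str.isIn "/for-rent/" url || PySem.Str.isIn "/rent/" url then
      pyOr (find_cat prices "yearly") (pyOr (find_cat prices "monthly") (some p0))
    else
      pyOr (find_cat prices "freehold") (pyOr (find_cat prices "leasehold")
        (pyOr (find_cat prices "yearly") (pyOr (find_cat prices "monthly") (some p0))))

-- ===== PORT B =====
-- one iteration of B's loop: state = (best, best_rank)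
def pvStep (cats : List String) (st : Option (List (String × String)) × Nat)
    (p : List (String × String)) : Option (List (String × String)) × Nat :=
  match pvGet p "category" with
  | some c =>
    match PySem.List.index? cats c with
    | some r => if r < st.2 then (some p, r) else st
    | none => st
  | none => st

def choose_primary_price_alt (prices : List (List (String × String))) (source_url : String) : Option (List (String × String)) :=
  match prices with
  | [] => none
  | p0 :: _ =>
    let url := PySem.Str.lower source_url
    let cats :=
      if PySem.Str.isIn "/for-sale/" url || PySem.Str.isIn "/sale/" url then ["freehold", "leasehold"]
      else if PySem.Str.isIn "/for-rent/" url || PySem.Str.isIn "/rent/" url then ["yearly", "monthly"]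
      else ["freehold", "leasehold", "yearly", "monthly"]
    let st := prices.foldl (pvStep cats) (none, cats.length)
    match st.1 with
    | some b => some b
    | none => some p0

-- ===== PRECONDITION & SPEC =====
def Spec_choose_primary_price (prices : List (List (String × String))) (source_url : String) (out : Option (List (String × String))) : Prop := out = choose_primary_price_alt prices source_url
instance (prices : List (List (String × String))) (source_url : String) (out : Option (List (String × String))) : Decidable (Spec_choose_primary_price prices source_url out) := by unfold Spec_choose_primary_price; infer_instance

-- ===== CLAIM (what is proved, stated in full; the proofs are below) =====
def Claim_equal_choose_primary_price : Prop := ∀ (prices : List (List (String × String))) (source_url : String), Dom_choose_primary_price prices source_url → Spec_choose_primary_price prices source_url (choose_primary_price prices source_url)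

-- ===== LEMMAS AND PROOFS =====

-- or-chain of A without the final prices[0] fallback
def pvChain (prices : List (List (String × String))) : List String → Option (List (String × String))
  | [] => none
  | c :: cs => (find_cat prices c).or (pvChain prices cs)

-- B's best-override from prices given current best_rank b (ignoring the incoming best)
def pvF (cats : List String) : List (List (String × String)) → Nat → Option (List (String × String))
  | [], _ => none
  | p :: rest, b =>
    match pvGet p "category" with
    | some c =>
      match PySem.List.index? cats c with
      | some r => if r < b then some ((pvF cats rest r).getD p) else pvF cats rest b
      | none => pvF cats rest b
    | none => pvF cats rest b

lemma find_cat_not_empty {prices : List (List (String × String))} {cat : String}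
    {p : List (String × String)} (h : find_cat prices cat = some p) : p.isEmpty = false := by
  induction prices with
  | nil => simp [find_cat] at h
  | cons q rest ih =>
    simp only [find_cat] at h
    split at h
    · next hq =>
      cases h
      cases p with
      | nil => simp [pvGet, List.find?] at hq
      | cons _ _ => rfl
    · exact ih h

lemma pyOr_eq_or (prices : List (List (String × String))) (cat : String)
    (x : Option (List (String × String))) :
    pyOr (find_cat prices cat) x = (find_cat prices cat).or x := by
  cases h : find_cat prices cat with
  | none => rfl
  | some p => simp [pyOr, find_cat_not_empty h]

lemma pvChain_nil (cats : List String) : pvChain [] cats = none := by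
  induction cats with
  | nil => rfl
  | cons c cs ih => simp [pvChain, find_cat, ih]

lemma pvChain_cons_skip {p : List (String × String)} (rest : List (List (String × String)))
    {l : List String} (h : ∀ c ∈ l, (pvGet p "category" == some c) = false) :
    pvChain (p :: rest) l = pvChain rest l := by
  induction l with
  | nil => rfl
  | cons c cs ih =>
    simp only [pvChain, find_cat, h c (by simp)]
    rw [ih (fun c hc => h c (by simp [hc]))]
    simp

lemma pvFold (cats : List String) (prices : List (List (String × String)))
    (best : Option (List (String × String))) (b : Nat) :
    (prices.foldl (pvStep cats) (best, b)).1 = (pvF cats prices b).or best := by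
  induction prices generalizing best b with
  | nil => simp [pvF]
  | cons p rest ih =>
    simp only [List.foldl_cons, pvF, pvStep]
    cases hc : pvGet p "category" with
    | none => exact ih best b
    | some c =>
      simp only []
      cases hi : PySem.List.index? cats c with
      | none => exact ih best b
      | some r =>
        simp only []
        by_cases hrb : r < b
        · rw [if_pos hrb, if_pos hrb, ih (some p) r]
          cases pvF cats rest r <;> simp
        · rw [if_neg hrb, if_neg hrb]
          exact ih best b

lemma pvF_eq_chain (cats : List String) (prices : List (List (String × String))) :
    ∀ b, pvF cats prices b = pvChain prices (cats.take b) := by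
  induction prices with
  | nil => intro b; simp [pvF, pvChain_nil]
  | cons p rest ih =>
    intro b
    simp only [pvF]
    cases hc : pvGet p "category" with
    | none =>
      rw [ih b, pvChain_cons_skip rest (fun c _ => by simp [hc])]
    | some c =>
      simp only []
      cases hi : PySem.List.index? cats c with
      | none =>
        have hnm : c ∉ cats := (PySem.List.index?_eq_none_iff cats c).mp hi
        have hsk : ∀ c' ∈ cats.take b, (pvGet p "category" == some c') = false := by
          intro c' hc'
          have hmem : c' ∈ cats := List.mem_of_mem_take hc'
          have hne : c ≠ c' := fun h => hnm (h ▸ hmem)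
          simp [hc, hne]
        rw [ih b, pvChain_cons_skip rest hsk]
      | some r =>
        obtain ⟨hk, hcr, hprev⟩ := PySem.List.getElem_of_index?_eq_some hi
        simp only []
        by_cases hrb : r < b
        · rw [if_pos hrb, ih r]
          have hsplit : cats.take b = cats.take r ++ cats[r] :: (cats.drop (r + 1)).take (b - r - 1) := by
            have h1 : cats.take b = cats.take r ++ (cats.drop r).take (b - r) := by
              rw [← List.take_add]; congr 1; omega
            rw [h1, List.drop_eq_getElem_cons hk]
            obtain ⟨m, hm⟩ : ∃ m, b - r = m + 1 := ⟨b - r - 1, by omega⟩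
            rw [hm, List.take_succ_cons]
            have hm' : m = b - r - 1 := by omega
            rw [hm']
            have h2 : b - r - 1 + 1 - 1 = b - r - 1 := by omega
            rw [h2]
          rw [hsplit]
          have happ : ∀ (l1 l2 : List String) (pr : List (List (String × String))),
              pvChain pr (l1 ++ l2) = (pvChain pr l1).or (pvChain pr l2) := by
            intro l1 l2 pr
            induction l1 with
            | nil => simp [pvChain]
            | cons x xs ihx => simp [pvChain, ihx, Option.or_assoc]
          rw [happ]
          have hskip : pvChain (p :: rest) (cats.take r) = pvChain rest (cats.take r) := by
            apply pvChain_cons_skip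
            intro c' hc'
            obtain ⟨j, hj, hj2⟩ := List.mem_take_iff_getElem.mp hc'
            have hne : c ≠ c' := fun h => hprev j (by omega) (hj2.trans h.symm)
            simp [hc, hne]
          rw [hskip]
          have hhead : pvChain (p :: rest) (cats[r] :: (cats.drop (r + 1)).take (b - r - 1)) = some p := by
            simp [pvChain, find_cat, hc, hcr]
          rw [hhead]
          cases pvChain rest (cats.take r) <;> simp
        · rw [if_neg hrb, ih b]
          have hsk : ∀ c' ∈ cats.take b, (pvGet p "category" == some c') = false := by
            intro c' hc'
            obtain ⟨j, hj, hj2⟩ := List.mem_take_iff_getElem.mp hc'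
            have hne : c ≠ c' := fun h => hprev j (by omega) (hj2.trans h.symm)
            simp [hc, hne]
          rw [pvChain_cons_skip rest hsk]

lemma pvBridge (cats : List String) (prices : List (List (String × String)))
    (p0 : List (String × String)) :
    (match (prices.foldl (pvStep cats) (none, cats.length)).1 with
     | some b => some b
     | none => some p0) = (pvChain prices cats).or (some p0) := by
  rw [pvFold, pvF_eq_chain, List.take_length]
  cases pvChain prices cats <;> simp

-- ===== VERDICT (by name: the statement is the Claim_ definition above) =====
theorem choose_primary_price_spec : Claim_equal_choose_primary_price := by
  intro prices source_url _
  unfold Spec_choose_primary_price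
  cases prices with
  | nil => rfl
  | cons p0 rest =>
    simp only [choose_primary_price, choose_primary_price_alt]
    split
    · rw [pvBridge]
      simp [pyOr_eq_or, pvChain]
    · split
      · rw [pvBridge]
        simp [pyOr_eq_or, pvChain]
      · rw [pvBridge]
        simp [pyOr_eq_or, pvChain]
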